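-- pv_equiv track=rewrite | github.com/Ryanless/CodeWars | kyu5678/kyu5.py | scramble_word
-- ===== SOURCE A (Python) =====
-- def scramble_word(word):
--     if len(word) <= 2:
--         return word
--     else:
--
--         start, end = '', ''
--         if word[0] in "-',.":
--             start = word[0]
--             word = word[1:]
--         if word[-1] in "-',.":
--             end = word[-1]
--             word = word[:-1]
--
--         new_word = word[0]
--         shorted_word = word[1: -1]
--         for char in 'abcdefghijklmnopqrstuvwxyz':
--             new_word += char * shorted_word.count(char)
--
--         for index in range(1, len(word) - 1):
--             if word[index] in "-',.":
--                 new_word = new_word[:index] + word[index] + new_word[index:]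
--
--         return start + new_word + word[-1] + end
-- ===== SOURCE B (Python) =====
-- # B: comparison sort of the interior letters (sorted + filter) instead of A's
-- # 26-pass counting loop; slices computed once from stripped bounds instead of
-- # rebinding `word`. Intended difference: a 3-char word with punctuation at BOTH
-- # ends (e.g. "-a,") makes A duplicate the single remaining letter ("-aa,");
-- # B leaves the word intact.
-- PUNCT = "-',."
-- LOWER = 'abcdefghijklmnopqrstuvwxyz'
--
-- def scramble_word(word):
--     if len(word) <= 2:
--         return word
--     s = 1 if word[0] in PUNCT else 0
--     e = len(word) - (1 if word[-1] in PUNCT else 0)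
--     core = word[s:e]
--     if len(core) <= 2:
--         inner = core
--     else:
--         res = [core[0]] + sorted(c for c in core[1:-1] if c in LOWER)
--         for i, c in enumerate(core[1:-1], 1):
--             if c in PUNCT:
--                 res.insert(i, c)
--         inner = ''.join(res) + core[-1]
--     return word[:s] + inner + word[e:]
-- ===== Notes on version B (the rewrite author's own statement) =====
-- stated objective: simpler
-- what changed: B replaces A's 26-pass counting loop over the alphabet with one comparison sort of the interior lowercase letters, computes the stripped core and its prefix/suffix once from slice bounds instead of rebinding word, and reinserts punctuation with list.insert over enumerate; on the degenerate core it returns the word unchanged where A duplicates a letter.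
-- intended difference: On 3-character words whose first and last characters are both in "-',." (e.g. "-a,"), A duplicates the single remaining middle character (returns "-aa,") because it re-appends word[-1] to a core of length 1; B returns the word unchanged ("-a,"), which is the intended value since a one-letter core has nothing to scramble. — e.g. on scramble_word("-a,"): A returns "-aa,", B returns "-a,"
import Mathlib
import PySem

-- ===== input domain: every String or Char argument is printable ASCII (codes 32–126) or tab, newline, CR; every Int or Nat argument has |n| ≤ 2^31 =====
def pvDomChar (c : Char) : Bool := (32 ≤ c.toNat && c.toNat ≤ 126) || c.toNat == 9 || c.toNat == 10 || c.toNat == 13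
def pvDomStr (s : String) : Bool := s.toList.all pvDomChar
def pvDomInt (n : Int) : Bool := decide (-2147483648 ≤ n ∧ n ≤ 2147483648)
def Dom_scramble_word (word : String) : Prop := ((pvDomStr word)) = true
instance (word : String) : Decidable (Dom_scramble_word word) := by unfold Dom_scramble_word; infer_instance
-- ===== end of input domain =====

-- B replaces A's 26-pass counting loop with one comparison sort of the interior
-- lowercase letters and computes the stripped core once from slice bounds; on a
-- 3-char word with punctuation at both ends A duplicates the middle letter, B
-- leaves the word unchanged (see D_ below).

-- ===== PORT A =====
def pvPunct : List Char := ['-', '\'', ',', '.']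

def pvAlpha : List Char := "abcdefghijklmnopqrstuvwxyz".toList

-- literal transliteration of A (on the char list; strings are code-point lists)
def scramble_word (word : String) : String :=
  if word.toList.length ≤ 2 then word else
    let w0 := word.toList
    let sw : List Char × List Char :=
      if PySem.List.pyGetD w0 0 ' ' ∈ pvPunct then
        ([PySem.List.pyGetD w0 0 ' '], PySem.List.slice w0 (some 1) none)
      else ([], w0)
    let start := sw.1
    let w1 := sw.2
    let ew : List Char × List Char :=
      if PySem.List.pyGetD w1 (-1) ' ' ∈ pvPunct then
        ([PySem.List.pyGetD w1 (-1) ' '], PySem.List.slice w1 none (some (-1)))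
      else ([], w1)
    let endc := ew.1
    let w := ew.2
    let shorted := PySem.List.slice w (some 1) (some (-1))
    let nw := pvAlpha.foldl
      (fun acc ch => acc ++ List.replicate (PySem.Chars.count shorted [ch]) ch)
      [PySem.List.pyGetD w 0 ' ']
    let nw2 := (PySem.List.pyRange 1 ((w.length : Int) - 1)).foldl
      (fun acc idx =>
        if PySem.List.pyGetD w idx ' ' ∈ pvPunct then
          PySem.List.slice acc none (some idx) ++
            PySem.List.pyGetD w idx ' ' :: PySem.List.slice acc (some idx) none
        else acc) nw
    String.ofList (start ++ nw2 ++ PySem.List.pyGetD w (-1) ' ' :: endc)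

-- ===== PORT B =====
-- literal transliteration of B (Source B)
def scramble_word_alt (word : String) : String :=
  if word.toList.length ≤ 2 then word else
    let w := word.toList
    let s : Int := if PySem.List.pyGetD w 0 ' ' ∈ pvPunct then 1 else 0
    let e : Int := (w.length : Int) - (if PySem.List.pyGetD w (-1) ' ' ∈ pvPunct then 1 else 0)
    let core := PySem.List.slice w (some s) (some e)
    let inner : List Char :=
      if core.length ≤ 2 then core else
        let mid := PySem.List.slice core (some 1) (some (-1))
        let res0 := PySem.List.pyGetD core 0 ' ' ::
          PySem.List.sorted (mid.filter (fun c => decide (c ∈ pvAlpha))) (fun x => x) false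
        let res := (PySem.List.enumerate mid 1).foldl
          (fun acc p => if p.2 ∈ pvPunct then PySem.List.insert acc p.1 p.2 else acc) res0
        res ++ [PySem.List.pyGetD core (-1) ' ']
    String.ofList (PySem.List.slice w none (some s) ++ inner ++ PySem.List.slice w (some e) none)

-- ===== PRECONDITION & SPEC =====
-- On 3-character words with punctuation at both ends A duplicates the single
-- middle character (e.g. "-a," ↦ "-aa,"); B returns the word unchanged, the
-- intended value since a one-letter core has nothing to scramble.
-- D_ is a closed-form shape test on the input: length exactly 3, and both the
-- first and the last character belong to the punctuation set "-',.".
def pvDPunct : List Char := "-',.".toList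

def D_scramble_word (word : String) : Prop :=
  (word.toList.length == 3
    && pvDPunct.contains (word.toList.headD ' ')
    && pvDPunct.contains (word.toList.getLastD ' ')) = true
instance (word : String) : Decidable (D_scramble_word word) := by
  unfold D_scramble_word; infer_instance

def Spec_scramble_word (word : String) (out : String) : Prop :=
  ¬ D_scramble_word word → out = scramble_word_alt word
instance (word : String) (out : String) : Decidable (Spec_scramble_word word out) := by
  unfold Spec_scramble_word; infer_instance

def pvDiffWitness_scramble_word : String := "-a,"
def pvDiffWitnessOut_scramble_word : String × String := ("-aa,", "-a,")

-- ===== CLAIM (what is proved, stated in full; the proofs are below) =====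
def Claim_unchanged_scramble_word : Prop :=
  ∀ (word : String), Dom_scramble_word word → Spec_scramble_word word (scramble_word word)
def Claim_changed_scramble_word : Prop :=
  Dom_scramble_word (pvDiffWitness_scramble_word) ∧
    D_scramble_word (pvDiffWitness_scramble_word) ∧
    scramble_word (pvDiffWitness_scramble_word) = pvDiffWitnessOut_scramble_word.1 ∧
    scramble_word_alt (pvDiffWitness_scramble_word) = pvDiffWitnessOut_scramble_word.2 ∧
    pvDiffWitnessOut_scramble_word.1 ≠ pvDiffWitnessOut_scramble_word.2
def Claim_exact_scramble_word : Prop :=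
  ∀ (word : String), Dom_scramble_word word → D_scramble_word word →
    scramble_word word ≠ scramble_word_alt word

-- ===== LEMMAS AND PROOFS =====

-- D_ unfolded to the propositional shape the main lemmas use
lemma pvD_iff (word : String) :
    D_scramble_word word ↔
      (word.toList.length = 3 ∧ word.toList.headD ' ' ∈ pvPunct ∧
        (word.toList.getLast?.getD ' ') ∈ pvPunct) := by
  unfold D_scramble_word
  have hp : pvDPunct = pvPunct := by decide
  rw [hp, ← List.getLastD_eq_getLast?]
  simp [Bool.and_assoc]

-- str.count with a single-character needle is the char count
lemma pvCountGo_singleton (c : Char) :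
    ∀ (l : List Char) (fuel acc : Nat), l.length ≤ fuel →
      PySem.Chars.count.go [c] fuel l acc = acc + l.count c := by
  intro l
  induction l with
  | nil => intro fuel acc _; cases fuel <;> simp [PySem.Chars.count.go]
  | cons x t ih =>
      intro fuel acc hf
      cases fuel with
      | zero => simp at hf
      | succ f =>
          have ht : t.length ≤ f := by simpa using hf
          by_cases hx : c = x
          · subst hx
            rw [show PySem.Chars.count.go [c] (f + 1) (c :: t) acc
                = PySem.Chars.count.go [c] f t (acc + 1) by
              simp [PySem.Chars.count.go, List.isPrefixOf]]
            rw [ih f (acc + 1) ht, List.count_cons]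
            simp; omega
          · rw [show PySem.Chars.count.go [c] (f + 1) (x :: t) acc
                = PySem.Chars.count.go [c] f t acc by
              simp [PySem.Chars.count.go, List.isPrefixOf, hx]]
            rw [ih f acc ht, List.count_cons]
            simp [Ne.symm hx]

lemma pvCount_singleton (l : List Char) (c : Char) :
    PySem.Chars.count l [c] = l.count c := by
  simp [PySem.Chars.count, pvCountGo_singleton c l l.length 0 le_rfl]

-- counting over a Nodup key list realises each char's multiplicity once
lemma pvCount_flatMap (ks : List Char) (hnd : ks.Nodup) (l : List Char) (x : Char) :
    (ks.flatMap (fun ch => List.replicate (l.count ch) ch)).count x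
      = if x ∈ ks then l.count x else 0 := by
  induction ks with
  | nil => simp
  | cons k ks ih =>
      rcases List.nodup_cons.mp hnd with ⟨hk, hnd'⟩
      have := ih hnd'
      by_cases hx : x = k
      · subst hx
        simp [List.count_append, this, hk]
      · simp [List.count_append, List.count_replicate, this, hx, Ne.symm hx]

lemma pvPairwise_flatMap (ks : List Char) (hs : ks.Pairwise (· ≤ ·)) (l : List Char) :
    (ks.flatMap (fun ch => List.replicate (l.count ch) ch)).Pairwise (· ≤ ·) := by
  induction ks with
  | nil => simp
  | cons k ks ih =>
      rcases List.pairwise_cons.mp hs with ⟨hk, hs'⟩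
      simp only [List.flatMap_cons]
      rw [List.pairwise_append]
      refine ⟨?_, ih hs', ?_⟩
      · exact List.pairwise_replicate.mpr (Or.inr le_rfl)
      · intro a ha b hb
        obtain rfl := List.eq_of_mem_replicate ha
        obtain ⟨ch, hch, hb'⟩ := List.mem_flatMap.mp hb
        obtain rfl := List.eq_of_mem_replicate hb'
        exact hk _ hch

-- A's counting loop produces exactly sorted(filter-lowercase)
lemma pvCountSort (l : List Char) (init : List Char) :
    pvAlpha.foldl (fun acc ch => acc ++ List.replicate (PySem.Chars.count l [ch]) ch) init
      = init ++ PySem.List.sorted (l.filter (fun c => decide (c ∈ pvAlpha))) (fun x => x) false := by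
  have h1 : ∀ ch, PySem.Chars.count l [ch] = l.count ch := fun ch => pvCount_singleton l ch
  simp only [h1, PySem.List.foldl_append_eq_flatMap]
  congr 1
  symm
  apply PySem.List.sorted_id_eq_of_perm_of_pairwise
  · rw [List.perm_iff_count]
    intro x
    rw [pvCount_flatMap pvAlpha (by decide) l x]
    by_cases hx : x ∈ pvAlpha
    · rw [List.count_filter (by simpa using hx)]
      simp [hx]
    · have hnm : x ∉ l.filter (fun c => decide (c ∈ pvAlpha)) := by
        simp [List.mem_filter, hx]
      simp [hx, List.count_eq_zero_of_not_mem hnm]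
  · exact pvPairwise_flatMap pvAlpha (by decide) l

-- slice-splice at nonnegative index is list.insert
lemma pvSliceInsert (xs : List Char) (k : Nat) (v : Char) :
    PySem.List.slice xs none (some (k : Int)) ++ v :: PySem.List.slice xs (some (k : Int)) none
      = PySem.List.insert xs (k : Int) v := by
  rw [PySem.List.slice_to_natCast, PySem.List.slice_from_natCast]
  simp only [PySem.List.insert, PySem.List.sliceIndices]
  norm_num
  have hif : (if (k : Int) < 0 then max ((k : Int) + (xs.length : Int)) 0
      else min (k : Int) (xs.length : Int)) = min (k : Int) (xs.length : Int) := by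
    rw [if_neg (by omega)]
  have hmin : (min (k : Int) (xs.length : Int)).toNat = min k xs.length := by omega
  have ht : List.take (min k xs.length) xs = List.take k xs := by
    rcases le_total k xs.length with h | h
    · rw [min_eq_left h]
    · rw [min_eq_right h, List.take_length, List.take_of_length_le h]
  have hd : List.drop (min k xs.length) xs = List.drop k xs := by
    rcases le_total k xs.length with h | h
    · rw [min_eq_left h]
    · rw [min_eq_right h, List.drop_length, List.drop_eq_nil_of_le h]
  rw [hif, hmin, ht, hd]

lemma pvPyRange_one_eq_map (m : Nat) :
    PySem.List.pyRange 1 ((m : Int) + 1) = (List.range m).map (fun k : Nat => ((k : Int) + 1)) := by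
  induction m with
  | zero =>
      have : PySem.List.pyRange 1 ((0 : Int) + 1) = [] := by decide
      simpa using this
  | succ m ih =>
      have h : (1 : Int) ≤ (m : Int) + 1 := by omega
      have : ((m : Int) + 1 + 1) = (((m : Int) + 1) + 1) := by ring
      rw [show ((m.succ : Int) + 1) = ((m : Int) + 1) + 1 by push_cast; ring,
        PySem.List.pyRange_one_succ_right h, ih, List.range_succ]
      simp

lemma pvEnumerate_cons (x : Char) (t : List Char) (s : Int) :
    PySem.List.enumerate (x :: t) s = (s, x) :: PySem.List.enumerate t (s + 1) := rfl

lemma pvEnumerate_eq_map (xs : List Char) (s : Int) :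
    PySem.List.enumerate xs s
      = (List.range xs.length).map (fun k : Nat => (s + (k : Int), xs.getD k ' ')) := by
  induction xs generalizing s with
  | nil => simp [PySem.List.enumerate]
  | cons x t ih =>
      rw [pvEnumerate_cons, ih (s + 1)]
      simp only [List.length_cons, List.range_succ_eq_map, List.map_cons, List.map_map]
      refine congrArg₂ List.cons (by simp) ?_
      apply List.map_congr_left
      intro k _
      have h1 : s + 1 + (k : Int) = s + ((k : Int) + 1) := by ring
      simp [Nat.succ_eq_add_one, h1]

lemma pvSlice_mid (p q : Char) (mid : List Char) :
    PySem.List.slice (p :: mid ++ [q]) (some 1) (some (-1)) = mid := by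
  simp [PySem.List.slice, PySem.List.clampIdx]
  rw [if_neg (by omega)]
  simp

lemma pvGetD_last (p q : Char) (mid : List Char) :
    PySem.List.pyGetD (p :: mid ++ [q]) (-1) ' ' = q := by
  simpa using PySem.List.pyGetD_neg_one_append_singleton (xs := p :: mid) (x := q) (d := ' ')

set_option maxHeartbeats 1600000 in
lemma pvInner_eq (c : List Char) (hc : 2 ≤ c.length) :
    (PySem.List.pyRange 1 ((c.length : Int) - 1)).foldl
        (fun acc idx =>
          if PySem.List.pyGetD c idx ' ' ∈ pvPunct then
            PySem.List.slice acc none (some idx) ++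
              PySem.List.pyGetD c idx ' ' :: PySem.List.slice acc (some idx) none
          else acc)
        (pvAlpha.foldl
          (fun acc ch =>
            acc ++ List.replicate (PySem.Chars.count (PySem.List.slice c (some 1) (some (-1))) [ch]) ch)
          [PySem.List.pyGetD c 0 ' '])
      ++ [PySem.List.pyGetD c (-1) ' ']
      = if c.length ≤ 2 then c else
          (PySem.List.enumerate (PySem.List.slice c (some 1) (some (-1))) 1).foldl
            (fun acc p => if p.2 ∈ pvPunct then PySem.List.insert acc p.1 p.2 else acc)
            (PySem.List.pyGetD c 0 ' ' ::
              PySem.List.sorted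
                ((PySem.List.slice c (some 1) (some (-1))).filter (fun ch => decide (ch ∈ pvAlpha)))
                (fun x => x) false)
          ++ [PySem.List.pyGetD c (-1) ' '] := by
  by_cases h2 : c.length ≤ 2
  · -- c = [p, q]
    obtain ⟨p, q, rfl⟩ : ∃ p q, c = [p, q] := by
      match c, hc, h2 with
      | [p, q], _, _ => exact ⟨p, q, rfl⟩
    rw [if_pos (by simp)]
    have hsl : PySem.List.slice [p, q] (some 1) (some (-1)) = ([] : List Char) := by
      simp [PySem.List.slice, PySem.List.clampIdx]
    rw [hsl, pvCountSort]
    have hl2 : ((([p,q] : List Char).length : Int) - 1) = 1 := by simp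
    have hr : PySem.List.pyRange 1 1 = [] := by decide
    rw [hl2, hr]
    simp [pysem, PySem.List.sorted]
  · push Not at h2
    obtain ⟨p, mid, q, rfl, hm⟩ : ∃ p mid q, c = p :: mid ++ [q] ∧ 1 ≤ mid.length := by
      match c, h2 with
      | p :: t, h2 =>
        rcases List.eq_nil_or_concat t with rfl | ⟨mid, q, rfl⟩
        · simp at h2
        · exact ⟨p, mid, q, by simp [List.concat_eq_append], by simp at h2 ⊢; omega⟩
    rw [if_neg (by omega)]
    rw [pvSlice_mid, pvGetD_last]
    rw [pvCountSort]
    congr 1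
    have hlen : (((p :: mid ++ [q]).length : Int) - 1) = (mid.length : Int) + 1 := by
      simp
    rw [hlen, pvPyRange_one_eq_map, pvEnumerate_eq_map]
    rw [List.foldl_map, List.foldl_map]
    simp only [List.singleton_append]
    apply PySem.List.foldl_congr_mem
    intro acc k hk
    have hk' : k < mid.length := List.mem_range.mp hk
    have hget : PySem.List.pyGetD (p :: mid ++ [q]) ((k : Int) + 1) ' ' = mid.getD k ' ' := by
      have h1 : ((k : Int) + 1) = (((k + 1 : Nat)) : Int) := by push_cast; ring
      rw [h1, PySem.List.pyGetD_natCast]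
      simp only [List.getD]
      simp [List.getElem?_append_left hk']
    rw [hget]
    have h1 : ((k : Int) + 1) = (((k + 1 : Nat)) : Int) := by push_cast; ring
    have h2 : (1 + (k : Int)) = (((k + 1 : Nat)) : Int) := by push_cast; ring
    by_cases hp : mid.getD k ' ' ∈ pvPunct
    · rw [if_pos hp, if_pos hp, h1, h2, pvSliceInsert]
    · rw [if_neg hp, if_neg hp]

set_option maxHeartbeats 1600000 in
lemma pvMain (w : List Char) (h3 : 3 ≤ w.length)
    (hD : ¬ (w.length = 3 ∧ w.headD ' ' ∈ pvPunct ∧ (w.getLast?.getD ' ') ∈ pvPunct)) :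
    scramble_word (String.ofList w) = scramble_word_alt (String.ofList w) := by
  obtain ⟨a, m, b, rfl, hm⟩ : ∃ a m b, w = a :: m ++ [b] ∧ 1 ≤ m.length := by
    match w, h3 with
    | a :: t, h3 =>
      rcases List.eq_nil_or_concat t with rfl | ⟨m, b, rfl⟩
      · simp at h3
      · exact ⟨a, m, b, by simp [List.concat_eq_append], by simp at h3 ⊢; omega⟩
  have hw : (String.ofList (a :: m ++ [b])).toList = a :: m ++ [b] := String.toList_ofList
  have hlen : (a :: m ++ [b]).length = m.length + 2 := by simp
  have hga : PySem.List.pyGetD (a :: m ++ [b]) 0 ' ' = a := PySem.List.pyGetD_zero_cons _ _ _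
  have hgb : PySem.List.pyGetD (a :: m ++ [b]) (-1) ' ' = b := by
    simpa using PySem.List.pyGetD_neg_one_append_singleton (xs := a :: m) (x := b) (d := ' ')
  have hgb1 : PySem.List.pyGetD (m ++ [b]) (-1) ' ' = b := by
    simpa using PySem.List.pyGetD_neg_one_append_singleton (xs := m) (x := b) (d := ' ')
  have htail : PySem.List.slice (a :: m ++ [b]) (some 1) none = m ++ [b] :=
    PySem.List.slice_from_one _
  have hdrop : PySem.List.slice (m ++ [b]) none (some (-1)) = m := by
    rw [PySem.List.slice_to_neg_one]; simp
  have hdrop2 : PySem.List.slice (a :: m ++ [b]) none (some (-1)) = a :: m := by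
    rw [PySem.List.slice_to_neg_one]
    rw [show a :: m ++ [b] = (a :: m) ++ [b] from rfl, List.dropLast_concat]
  have hpre1 : PySem.List.slice (a :: m ++ [b]) none (some 1) = [a] := by
    rw [PySem.List.slice_to _ (by norm_num)]
    simp
  have hpre0 : PySem.List.slice (a :: m ++ [b]) none (some 0) = [] := by
    rw [PySem.List.slice_to _ (by norm_num)]
    simp
  have hlenc : ((a :: m ++ [b]).length : Int) - 1 = ((m.length + 1 : Nat) : Int) := by
    rw [hlen]; push_cast; ring
  have hlenc0 : ((a :: m ++ [b]).length : Int) - 0 = ((m.length + 2 : Nat) : Int) := by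
    rw [hlen]; push_cast; ring
  have hsufb : PySem.List.slice (a :: m ++ [b]) (some (((m.length + 1 : Nat) : Int))) none = [b] := by
    rw [PySem.List.slice_from _ (by positivity)]
    rw [show ((m.length + 1 : Nat) : Int).toNat = (a :: m).length by
      simp only [List.length_cons]; omega]
    exact List.drop_left
  have hsufn : PySem.List.slice (a :: m ++ [b]) (some (((m.length + 2 : Nat) : Int))) none = [] := by
    rw [PySem.List.slice_from _ (by positivity)]
    rw [show ((m.length + 2 : Nat) : Int).toNat = (a :: m ++ [b]).length by rw [hlen]; omega]
    simp
  have hcore11 : PySem.List.slice (a :: m ++ [b]) (some 1) (some (((m.length + 1 : Nat) : Int))) = m := by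
    rw [PySem.List.slice_toNat _ (by norm_num) (by positivity)]
    rw [show ((m.length + 1 : Nat) : Int).toNat = m.length + 1 by omega]
    rw [show (1 : Int).toNat = 1 by norm_num]
    simp
  have hcore10 : PySem.List.slice (a :: m ++ [b]) (some 1) (some (((m.length + 2 : Nat) : Int))) = m ++ [b] := by
    rw [PySem.List.slice_toNat _ (by norm_num) (by positivity)]
    rw [show ((m.length + 2 : Nat) : Int).toNat = m.length + 2 by omega]
    rw [show (1 : Int).toNat = 1 by norm_num]
    simpa using List.take_of_length_le (by simp)
  have hcore01 : PySem.List.slice (a :: m ++ [b]) (some 0) (some (((m.length + 1 : Nat) : Int))) = a :: m := by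
    rw [PySem.List.slice_toNat _ (by norm_num) (by positivity)]
    rw [show ((m.length + 1 : Nat) : Int).toNat = m.length + 1 by omega]
    rw [show (0 : Int).toNat = 0 by norm_num]
    rw [List.drop_zero, Nat.sub_zero,
      show a :: m ++ [b] = (a :: m) ++ [b] from rfl]
    exact List.take_left' (by simp)
  have hcore00 : PySem.List.slice (a :: m ++ [b]) (some 0) (some (((m.length + 2 : Nat) : Int))) = a :: m ++ [b] := by
    rw [PySem.List.slice_toNat _ (by norm_num) (by positivity)]
    rw [show ((m.length + 2 : Nat) : Int).toNat = m.length + 2 by omega]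
    rw [show (0 : Int).toNat = 0 by norm_num]
    rw [List.drop_zero, Nat.sub_zero]
    exact List.take_of_length_le (by rw [hlen])
  by_cases hpa : a ∈ pvPunct <;> by_cases hpb : b ∈ pvPunct
  · -- both punct: m.length >= 2 since not D
    have hm2 : 2 ≤ m.length := by
      rcases Nat.lt_or_ge m.length 2 with h | h
      · exfalso; apply hD
        refine ⟨by simp; omega, by simpa using hpa, ?_⟩
        rw [show a :: m ++ [b] = (a :: m) ++ [b] from rfl, List.getLast?_concat]
        simpa using hpb
      · exact h
    simp only [scramble_word, scramble_word_alt, hw]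
    rw [if_neg (show ¬((a :: m ++ [b]).length ≤ 2) by rw [hlen]; omega)]
    rw [if_neg (show ¬((a :: m ++ [b]).length ≤ 2) by rw [hlen]; omega)]
    simp only [hga, hgb, hgb1, htail, hdrop, if_pos hpa, if_pos hpb, hlenc,
      hcore11, hpre1, hsufb]
    refine congrArg String.ofList ?_
    rw [← pvInner_eq m hm2]
    simp [List.append_assoc]
  · -- front punct only: core = m ++ [b]
    simp only [scramble_word, scramble_word_alt, hw]
    rw [if_neg (show ¬((a :: m ++ [b]).length ≤ 2) by rw [hlen]; omega)]
    rw [if_neg (show ¬((a :: m ++ [b]).length ≤ 2) by rw [hlen]; omega)]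
    simp only [hga, htail,
      if_pos hpa,
      if_neg (show PySem.List.pyGetD (m ++ [b]) (-1) ' ' ∉ pvPunct by rw [hgb1]; exact hpb),
      if_neg (show PySem.List.pyGetD (a :: m ++ [b]) (-1) ' ' ∉ pvPunct by rw [hgb]; exact hpb),
      hlenc0, hcore10, hpre1, hsufn]
    refine congrArg String.ofList ?_
    rw [← pvInner_eq (m ++ [b]) (by simp; omega)]
    simp [List.append_assoc]
  · -- back punct only: core = a :: m
    simp only [scramble_word, scramble_word_alt, hw]
    rw [if_neg (show ¬((a :: m ++ [b]).length ≤ 2) by rw [hlen]; omega)]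
    rw [if_neg (show ¬((a :: m ++ [b]).length ≤ 2) by rw [hlen]; omega)]
    simp only [hgb, hdrop2,
      if_neg (show PySem.List.pyGetD (a :: m ++ [b]) 0 ' ' ∉ pvPunct by rw [hga]; exact hpa),
      if_pos hpb, hlenc, hcore01, hpre0, hsufb]
    refine congrArg String.ofList ?_
    rw [← pvInner_eq (a :: m) (by simp; omega)]
    simp [List.append_assoc]
  · -- no punct: core = whole word
    simp only [scramble_word, scramble_word_alt, hw]
    rw [if_neg (show ¬((a :: m ++ [b]).length ≤ 2) by rw [hlen]; omega)]
    rw [if_neg (show ¬((a :: m ++ [b]).length ≤ 2) by rw [hlen]; omega)]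
    simp only [
      if_neg (show PySem.List.pyGetD (a :: m ++ [b]) 0 ' ' ∉ pvPunct by rw [hga]; exact hpa),
      if_neg (show PySem.List.pyGetD (a :: m ++ [b]) (-1) ' ' ∉ pvPunct by rw [hgb]; exact hpb),
      hlenc0, hcore00, hpre0, hsufn]
    refine congrArg String.ofList ?_
    rw [← pvInner_eq (a :: m ++ [b]) (by rw [hlen]; omega)]
    simp [List.append_assoc]

lemma pvA_three (a x b : Char) (ha : a ∈ pvPunct) (hb : b ∈ pvPunct) :
    scramble_word (String.ofList [a, x, b]) = String.ofList [a, x, x, b] := by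
  simp only [scramble_word, String.toList_ofList]
  rw [if_neg (by norm_num)]
  have h1 : PySem.List.pyGetD [a, x, b] 0 ' ' = a := PySem.List.pyGetD_zero_cons _ _ _
  have h2 : PySem.List.slice [a, x, b] (some 1) none = [x, b] := PySem.List.slice_from_one _
  have h3 : PySem.List.pyGetD [x, b] (-1) ' ' = b := by
    simpa using PySem.List.pyGetD_neg_one_append_singleton (xs := [x]) (x := b) (d := ' ')
  have h4 : PySem.List.slice [x, b] none (some (-1)) = [x] := by
    rw [PySem.List.slice_to_neg_one]; rfl
  have h5 : PySem.List.slice [x] (some 1) (some (-1)) = ([] : List Char) := by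
    simp [PySem.List.slice, PySem.List.clampIdx]
  have h6 : PySem.List.pyGetD [x] (-1) ' ' = x := by
    simpa using PySem.List.pyGetD_neg_one_append_singleton (xs := []) (x := x) (d := ' ')
  have h7 : PySem.List.pyGetD [x] 0 ' ' = x := PySem.List.pyGetD_zero_cons _ _ _
  simp only [h1, if_pos ha, h2, h3, if_pos hb, h4, h5, h6, h7]
  rw [pvCountSort]
  have h8 : PySem.List.pyRange 1 ((([x] : List Char).length : Int) - 1) = [] := by
    rw [show ((([x] : List Char).length : Int) - 1) = 0 by simp]
    decide
  rw [h8]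
  simp [PySem.List.sorted]

lemma pvB_three (a x b : Char) (ha : a ∈ pvPunct) (hb : b ∈ pvPunct) :
    scramble_word_alt (String.ofList [a, x, b]) = String.ofList [a, x, b] := by
  simp only [scramble_word_alt, String.toList_ofList]
  rw [if_neg (by norm_num)]
  have h1 : PySem.List.pyGetD [a, x, b] 0 ' ' = a := PySem.List.pyGetD_zero_cons _ _ _
  have h3 : PySem.List.pyGetD [a, x, b] (-1) ' ' = b := by
    simpa using PySem.List.pyGetD_neg_one_append_singleton (xs := [a, x]) (x := b) (d := ' ')
  have hlen3 : ((([a, x, b] : List Char).length : Int) - 1) = 2 := by simp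
  have hcore : PySem.List.slice [a, x, b] (some 1) (some (2 : Int)) = [x] := by
    rw [PySem.List.slice_toNat _ (by norm_num) (by norm_num)]
    rfl
  have hpre : PySem.List.slice [a, x, b] none (some 1) = [a] := by
    rw [PySem.List.slice_to _ (by norm_num)]
    rfl
  have hsuf : PySem.List.slice [a, x, b] (some (2 : Int)) none = [b] := by
    rw [PySem.List.slice_from _ (by norm_num)]
    rfl
  simp only [h1, if_pos ha, h3, if_pos hb, hlen3, hcore, hpre, hsuf]
  rw [if_pos (by norm_num)]
  rfl

-- ===== VERDICT (by name: the statement is the Claim_ definition above) =====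
theorem scramble_word_spec : Claim_unchanged_scramble_word := by
  intro word _ hD
  show scramble_word word = scramble_word_alt word
  by_cases h2 : word.toList.length ≤ 2
  · unfold scramble_word scramble_word_alt
    rw [if_pos h2, if_pos h2]
  · have hD' : ¬ (word.toList.length = 3 ∧ word.toList.headD ' ' ∈ pvPunct ∧
        (word.toList.getLast?.getD ' ') ∈ pvPunct) := fun h => hD ((pvD_iff word).mpr h)
    have h := pvMain word.toList (by omega) hD'
    rwa [String.ofList_toList] at h

theorem scramble_word_changed : Claim_changed_scramble_word := by
  unfold Claim_changed_scramble_word; decide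

theorem scramble_word_tight : Claim_exact_scramble_word := by
  intro word _ hD
  obtain ⟨hlen, hhd, hlast⟩ := (pvD_iff word).mp hD
  obtain ⟨a, x, b, hw⟩ := List.length_eq_three.mp hlen
  have ha : a ∈ pvPunct := by rw [hw] at hhd; exact hhd
  have hb : b ∈ pvPunct := by rw [hw] at hlast; exact hlast
  have hword : word = String.ofList [a, x, b] := by rw [← hw, String.ofList_toList]
  rw [hword, pvA_three a x b ha hb, pvB_three a x b ha hb]
  intro h
  have h4 := congrArg List.length (congrArg String.toList h)
  simp at h4
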